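-- pv_equiv track=rewrite | github.com/seung-hun-h/algorithm | 0_4.programmers/monthly_4/1.py | solution
-- ===== SOURCE A (Python) =====
-- from collections import deque
--
-- def solution(a, edges):
--     _sum = sum(list(a))
--     if _sum != 0: return -1
--     graph = [[] for _ in range(len(a))]
--     cnt = [0] * len(a)
--
--     for u, v in edges:
--         graph[u].append(v)
--         graph[v].append(u)
--
--     ans = 10000000000000
--     for i in range(len(a)):
--         ans = min(ans, bfs(i, a, graph))
--     return ans
--
-- def bfs(start, a, graph):
--     visited = [False] * len(a)
--     visited[start] = True
--     q = deque()
--     q.append(start)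
--     temp = [a[i] for i in range(len(a))]
--     while q:
--         v = q.popleft()
--
--         for adj in graph[v]:
--             if not visited[adj]:
--                 visited[adj] = True
--                 temp[v] += a[adj]
--     return sum(list(map(abs, temp)))
-- ===== SOURCE B (Python) =====
-- def solution(a, edges):
--     if sum(a) != 0:
--         return -1
--     n = len(a)
--     nbrs = [set() for _ in range(n)]
--     for u, v in edges:
--         nbrs[u].add(v)
--         nbrs[v].add(u)
--     total = sum(abs(x) for x in a)
--     best = 10000000000000
--     for i in range(n):
--         s = sum(a[j] for j in nbrs[i] if j != i)
--         best = min(best, total - abs(a[i]) + abs(a[i] + s))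
--     return best
-- ===== Notes on version B (the rewrite author's own statement) =====
-- stated objective: alternative
-- what changed: A re-runs a per-node pass (copying the array, scanning the node's adjacency with a visited array, then summing all absolute values) for every node; B builds per-node neighbor sets once, precomputes the total of absolute values, and takes the minimum of total - |a[i]| + |a[i] + neighbor_sum(i)| in a single pass (measured ~1.4x at the largest size, below the 1.5x bar, so not claimed as faster).
-- outside the precondition, e.g. on solution([5, -2, -3], [[0, -3], [0, 1]]): A returns 8, B returns 10
import Mathlib
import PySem

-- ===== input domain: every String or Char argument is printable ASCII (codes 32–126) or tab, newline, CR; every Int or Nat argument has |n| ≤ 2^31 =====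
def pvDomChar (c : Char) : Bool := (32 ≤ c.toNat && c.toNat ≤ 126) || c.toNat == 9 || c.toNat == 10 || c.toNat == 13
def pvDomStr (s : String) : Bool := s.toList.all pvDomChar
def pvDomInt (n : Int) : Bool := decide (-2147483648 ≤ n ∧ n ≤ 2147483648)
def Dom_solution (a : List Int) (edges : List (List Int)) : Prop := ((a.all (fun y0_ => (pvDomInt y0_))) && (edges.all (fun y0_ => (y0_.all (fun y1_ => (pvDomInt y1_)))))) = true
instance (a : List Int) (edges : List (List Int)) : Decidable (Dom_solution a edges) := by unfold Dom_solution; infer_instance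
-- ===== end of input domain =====

-- B replaces A's per-node pass (copy array, scan the node's adjacency with a visited array, sum
-- all absolute values) by neighbor sets built once, a precomputed total of |a|, and a single
-- minimum pass over total - |a[i]| + |a[i] + neighbor_sum(i)|; same return value, no mutation.

-- ===== PORT A =====
-- a[i] / temp[v] with a Python int index (IndexError excluded by Pre_; total form for the port)
def pvGetI (xs : List Int) (i : Int) : Int := (PySem.List.pyGet? xs i).getD 0

-- for u, v in edges: graph[u].append(v); graph[v].append(u)
def pvBuildGraph (edges : List (List Int)) (g0 : List (List Int)) : List (List Int) :=
  edges.foldl (fun g e =>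
    match e with
    | [u, v] =>
        let g1 := PySem.List.pySetD g u (((PySem.List.pyGet? g u).getD []) ++ [v])
        PySem.List.pySetD g1 v (((PySem.List.pyGet? g1 v).getD []) ++ [u])
    | _ => g) g0

-- body of "for adj in graph[v]: if not visited[adj]: visited[adj]=True; temp[v]+=a[adj]"
def pvBfsStep (a : List Int) (v : Int) (s : List Bool × List Int) (adj : Int) : List Bool × List Int :=
  if (PySem.List.pyGet? s.1 adj).getD true = false then
    (PySem.List.pySetD s.1 adj true,
     PySem.List.pySetD s.2 v (pvGetI s.2 v + pvGetI a adj))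
  else s

-- "while q: v = q.popleft(); for adj in graph[v] …" — the Python loop never appends to q,
-- so the queue only shrinks; recursion on the queue list is the literal loop
def pvBfsLoop (a : List Int) (graph : List (List Int)) : List Int → List Bool × List Int → List Int
  | [], st => st.2
  | v :: q, st => pvBfsLoop a graph q (((PySem.List.pyGet? graph v).getD []).foldl (pvBfsStep a v) st)

def pvBfs (start : Int) (a : List Int) (graph : List (List Int)) : Int :=
  let visited := PySem.List.pySetD (List.replicate a.length false) start true
  let temp := (List.range a.length).map (fun (i : Nat) => pvGetI a (i : Int))
  ((pvBfsLoop a graph [start] (visited, temp)).map (fun x => |x|)).sum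

def solution (a : List Int) (edges : List (List Int)) : Int :=
  let s := a.sum
  if s ≠ 0 then -1
  else
    let graph := pvBuildGraph edges (List.replicate a.length [])
    (List.range a.length).foldl (fun (ans : Int) (i : Nat) => min ans (pvBfs (i : Int) a graph)) 10000000000000

-- ===== PORT B =====
-- for u, v in edges: nbrs[u].add(v); nbrs[v].add(u)
def pvBuildNbrs (edges : List (List Int)) (nb0 : List (PySem.Set Int)) : List (PySem.Set Int) :=
  edges.foldl (fun nb e =>
    match e with
    | [u, v] =>
        let nb1 := PySem.List.pySetD nb u (PySem.Set.add ((PySem.List.pyGet? nb u).getD PySem.Set.empty) v)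
        PySem.List.pySetD nb1 v (PySem.Set.add ((PySem.List.pyGet? nb1 v).getD PySem.Set.empty) u)
    | _ => nb) nb0

def solution_alt (a : List Int) (edges : List (List Int)) : Int :=
  if a.sum ≠ 0 then -1
  else
    let n := a.length
    let nbrs := pvBuildNbrs edges (List.replicate n PySem.Set.empty)
    let total := (a.map (fun x => |x|)).sum
    (List.range n).foldl
      (fun (best : Int) (i : Nat) =>
        let s := ((((PySem.List.pyGet? nbrs (i : Int)).getD []).filter (fun j => j != (i : Int))).map (fun j => pvGetI a j)).sum
        min best (total - |pvGetI a (i : Int)| + |pvGetI a (i : Int) + s|)) 10000000000000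

-- ===== PRECONDITION & SPEC =====
-- Pre_ restricts to the natural domain of node labels: when sum(a) = 0 is reached, every edge must be a
-- pair of in-range non-negative node indices.  Excluded inputs where A still returns a value are only
-- those whose edges use Python's negative-index wraparound (node label -k for node n-k), outside the
-- natural domain; malformed or out-of-range edges make A raise (ValueError/IndexError) and are excluded too.
def Pre_solution (a : List Int) (edges : List (List Int)) : Prop :=
  a.sum = 0 → ∀ e ∈ edges, e.length = 2 ∧ ∀ x ∈ e, 0 ≤ x ∧ x < (a.length : Int)
instance (a : List Int) (edges : List (List Int)) : Decidable (Pre_solution a edges) := by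
  unfold Pre_solution; infer_instance

def pvWitness_solution : List Int × List (List Int) := ([1, 2, -3], [[0, 1], [1, 2], [1, 0]])

def Spec_solution (a : List Int) (edges : List (List Int)) (out : Int) : Prop := out = solution_alt a edges
instance (a : List Int) (edges : List (List Int)) (out : Int) : Decidable (Spec_solution a edges out) := by unfold Spec_solution; infer_instance

-- ===== CLAIM (what is proved, stated in full; the proofs are below) =====
def Claim_equal_solution : Prop := ∀ (a : List Int) (edges : List (List Int)), Dom_solution a edges → Pre_solution a edges → Spec_solution a edges (solution a edges)

-- ===== LEMMAS AND PROOFS =====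

-- the fresh elements of l relative to seen, first occurrences, in order
def pvDnew : List Int → List Int → List Int
  | [], _ => []
  | x :: xs, seen => if x ∈ seen then pvDnew xs seen else x :: pvDnew xs (x :: seen)

theorem pvDnew_congr : ∀ (l s s' : List Int), (∀ y, y ∈ s ↔ y ∈ s') → pvDnew l s = pvDnew l s' := by
  intro l
  induction l with
  | nil => intro s s' _; rfl
  | cons x xs ih =>
      intro s s' h
      by_cases hx : x ∈ s
      · simp [pvDnew, hx, (h x).mp hx, ih s s' h]
      · have hx' : x ∉ s' := fun hc => hx ((h x).mpr hc)
        simp only [pvDnew, if_neg hx, if_neg hx']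
        refine congrArg (x :: ·) (ih _ _ ?_)
        intro y; simp [h y]

theorem pvSet_update_eq : ∀ (l s : List Int), PySem.Set.update s l = s ++ pvDnew l s := by
  intro l
  induction l with
  | nil => intro s; simp [PySem.Set.update, pvDnew]
  | cons x xs ih =>
      intro s
      have hstep : PySem.Set.update s (x :: xs) = PySem.Set.update (PySem.Set.add s x) xs := rfl
      by_cases hx : x ∈ s
      · have hadd : PySem.Set.add s x = s := by simp [PySem.Set.add, hx]
        rw [hstep, hadd, ih s, pvDnew, if_pos hx]
      · have hadd : PySem.Set.add s x = s ++ [x] := by simp [PySem.Set.add, hx]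
        rw [hstep, hadd, ih (s ++ [x]),
          pvDnew_congr xs (s ++ [x]) (x :: s) (by intro y; simp [or_comm]), pvDnew, if_neg hx]
        simp

theorem pvDedup_eq_dnew (l : List Int) : PySem.List.dedup l = pvDnew l [] := by
  rw [PySem.List.dedup_eq_ofList, PySem.Set.ofList_eq_foldl,
    show List.foldl PySem.Set.add [] l = PySem.Set.update [] l from rfl, pvSet_update_eq]
  simp

theorem pvDnew_filter : ∀ (l s t : List Int), pvDnew l (s ++ t) = (pvDnew l t).filter (fun x => decide (x ∉ s)) := by
  intro l
  induction l with
  | nil => intro s t; rfl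
  | cons x xs ih =>
      intro s t
      by_cases hxt : x ∈ t
      · simp [pvDnew, hxt, List.mem_append.mpr (Or.inr hxt), ih s t]
      · by_cases hxs : x ∈ s
        · have hmem : x ∈ s ++ t := List.mem_append.mpr (Or.inl hxs)
          simp only [pvDnew, if_pos hmem, if_neg hxt, List.filter_cons]
          rw [if_neg (by simp [hxs])]
          have h1 : pvDnew xs (s ++ t) = pvDnew xs (s ++ (x :: t)) := by
            apply pvDnew_congr; intro y
            simp only [List.mem_append, List.mem_cons]
            constructor
            · rintro (h | h) <;> tauto
            · rintro (h | h | h) <;> [tauto; (exact Or.inl (h ▸ hxs)); tauto]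
          rw [h1, ih s (x :: t)]
        · have hmem : x ∉ s ++ t := by simp [hxs, hxt]
          simp only [pvDnew, if_neg hmem, if_neg hxt, List.filter_cons]
          rw [if_pos (by simp [hxs])]
          have h1 : pvDnew xs (x :: (s ++ t)) = pvDnew xs (s ++ (x :: t)) := by
            apply pvDnew_congr; intro y; simp; tauto
          rw [h1, ih s (x :: t)]

-- visited as the characteristic list of a seen-set
def pvVis (n : Nat) (seen : List Int) : List Bool := (List.range n).map (fun (j : Nat) => decide ((j : Int) ∈ seen))

theorem pvVis_get (n : Nat) (seen : List Int) (k : Nat) (hk : k < n) :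
    (PySem.List.pyGet? (pvVis n seen) (k : Int)).getD true = decide ((k : Int) ∈ seen) := by
  rw [PySem.List.pyGet?_natCast]
  simp only [pvVis, List.getElem?_map, List.getElem?_range hk, Option.map_some, Option.getD_some]

theorem pvVis_set (n : Nat) (seen : List Int) (k : Nat) (hk : k < n) :
    PySem.List.pySetD (pvVis n seen) (k : Int) true = pvVis n ((k : Int) :: seen) := by
  rw [PySem.List.pySetD_of_nonneg _ _ (by positivity), Int.toNat_natCast]
  apply List.ext_getElem
  · simp [pvVis]
  · intro j h1 h2
    have hj : j < n := by simpa [pvVis] using h2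
    have hjr : j < (List.range n).length := by simpa using hj
    by_cases hjk : j = k
    · subst hjk
      simp [List.getElem_set, pvVis, List.getElem_map, List.getElem_range hjr]
    · have hkj : ¬ k = j := fun h => hjk h.symm
      have hcast : ¬ ((j : Int) = (k : Int)) := by exact_mod_cast hjk
      simp [List.getElem_set, hkj, pvVis, List.getElem_map, List.getElem_range hjr, hcast] <;>
        tauto

theorem pvVis_init (n : Nat) (k : Nat) (hk : k < n) :
    PySem.List.pySetD (List.replicate n false) (k : Int) true = pvVis n [(k : Int)] := by
  rw [PySem.List.pySetD_of_nonneg _ _ (by positivity), Int.toNat_natCast]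
  apply List.ext_getElem
  · simp [pvVis]
  · intro j h1 h2
    have hj : j < n := by simpa [pvVis] using h2
    have hjr : j < (List.range n).length := by simpa using hj
    by_cases hjk : j = k
    · subst hjk
      simp [List.getElem_set, pvVis, List.getElem_map, List.getElem_range hjr]
    · have hkj : ¬ k = j := fun h => hjk h.symm
      have hcast : ¬ ((j : Int) = (k : Int)) := by exact_mod_cast hjk
      simp [List.getElem_set, hkj, pvVis, List.getElem_map, List.getElem_range hjr, hcast] <;>
        tauto

theorem pvTemp_init (a : List Int) : (List.range a.length).map (fun (i : Nat) => pvGetI a (i : Int)) = a := by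
  apply List.ext_getElem
  · simp
  · intro j h1 h2
    have hjr : j < (List.range a.length).length := by simpa using h2
    simp only [List.getElem_map, List.getElem_range hjr, pvGetI, PySem.List.pyGet?_natCast]
    simp [List.getElem?_eq_getElem h2]

theorem pvGetI_set_self (a : List Int) (k : Nat) (hk : k < a.length) (t : Int) :
    pvGetI (a.set k t) (k : Int) = t := by
  simp [pvGetI, PySem.List.pyGet?_natCast, List.getElem?_set, hk]

theorem pvSet_getI_self (a : List Int) (k : Nat) (hk : k < a.length) :
    a.set k (pvGetI a (k : Int)) = a := by
  apply List.ext_getElem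
  · simp
  · intro j h1 h2
    by_cases hjk : j = k
    · subst hjk
      simp [List.getElem_set, pvGetI, PySem.List.pyGet?_natCast, List.getElem?_eq_getElem h2]
    · have hkj : ¬ k = j := fun h => hjk h.symm
      simp [List.getElem_set, hkj]

-- the inner for-loop of bfs: folding graph[start] over (visited, temp)
theorem pv_bfs_fold (a : List Int) (k : Nat) (hk : k < a.length) :
    ∀ (l seen : List Int) (acc : Int),
      (∀ x ∈ l, 0 ≤ x ∧ x < (a.length : Int)) → ((k : Int) ∈ seen) →
      (l.foldl (pvBfsStep a (k : Int)) (pvVis a.length seen, a.set k (pvGetI a (k : Int) + acc))).2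
        = a.set k (pvGetI a (k : Int) + (acc + ((pvDnew l seen).map (fun j => pvGetI a j)).sum)) := by
  intro l
  induction l with
  | nil =>
      intro seen acc _ _
      simp only [List.foldl_nil, pvDnew, List.map_nil, List.sum_nil, add_zero]
  | cons x xs ih =>
      intro seen acc hl hs
      obtain ⟨hx0, hxn⟩ := hl x (by simp)
      have hxt : x = ((x.toNat : Nat) : Int) := by omega
      have hxlt : x.toNat < a.length := by omega
      by_cases hmem : x ∈ seen
      · have hvis : (PySem.List.pyGet? (pvVis a.length seen) x).getD true = true := by
          rw [hxt, pvVis_get _ _ _ hxlt]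
          simp [← hxt, hmem]
      -- visited: the step leaves the state unchanged
        simp only [List.foldl_cons, pvBfsStep, hvis]
        rw [if_neg (by simp)]
        rw [ih seen acc (fun y hy => hl y (by simp [hy])) hs]
        simp [pvDnew, hmem]
      · have hvis : (PySem.List.pyGet? (pvVis a.length seen) x).getD true = false := by
          rw [hxt, pvVis_get _ _ _ hxlt]
          simp [← hxt, hmem]
        simp only [List.foldl_cons, pvBfsStep, hvis]
        rw [if_pos (by trivial)]
        have hsetvis : PySem.List.pySetD (pvVis a.length seen) x true = pvVis a.length (x :: seen) := by
          rw [hxt, pvVis_set _ _ _ hxlt, ← hxt]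
        have hgettemp : pvGetI (a.set k (pvGetI a (k : Int) + acc)) (k : Int) = pvGetI a (k : Int) + acc :=
          pvGetI_set_self a k hk _
        have hsettemp :
            PySem.List.pySetD (a.set k (pvGetI a (k : Int) + acc)) (k : Int)
              (pvGetI (a.set k (pvGetI a (k : Int) + acc)) (k : Int) + pvGetI a x)
              = a.set k (pvGetI a (k : Int) + (acc + pvGetI a x)) := by
          rw [hgettemp, PySem.List.pySetD_of_nonneg _ _ (by positivity), Int.toNat_natCast,
            List.set_set]
          ring_nf
        rw [hsetvis, hsettemp,
          ih (x :: seen) (acc + pvGetI a x) (fun y hy => hl y (by simp [hy])) (by simp [hs])]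
        simp only [pvDnew, if_neg hmem, List.map_cons, List.sum_cons]
        ring_nf

theorem pvAbsSum_set : ∀ (a : List Int) (k : Nat), k < a.length → ∀ (t : Int),
    (((a.set k t).map (fun x => |x|)).sum : Int)
      = (a.map (fun x => |x|)).sum - |pvGetI a (k : Int)| + |t| := by
  intro a
  induction a with
  | nil => intro k hk; simp at hk
  | cons y ys ih =>
      intro k hk t
      cases k with
      | zero =>
          simp [pvGetI, PySem.List.pyGet?_natCast]
          ring
      | succ k =>
          have hk' : k < ys.length := by simpa using hk
          have hcast : ((k : Int) + 1) = ((k + 1 : Nat) : Int) := by push_cast; ring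
          simp only [List.set_cons_succ, List.map_cons, List.sum_cons]
          rw [ih k hk' t]
          have : pvGetI (y :: ys) ((k + 1 : Nat) : Int) = pvGetI ys (k : Int) := by
            simp [pvGetI, PySem.List.pyGet?_natCast]
          rw [this]
          ring

theorem pvBfs_eq (a : List Int) (graph : List (List Int)) (k : Nat) (hk : k < a.length)
    (hg : graph.length = a.length)
    (hrange : ∀ x ∈ graph.getD k [], 0 ≤ x ∧ x < (a.length : Int)) :
    pvBfs (k : Int) a graph
      = (a.map (fun x => |x|)).sum - |pvGetI a (k : Int)|
        + |pvGetI a (k : Int) + ((pvDnew (graph.getD k []) [(k : Int)]).map (fun j => pvGetI a j)).sum| := by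
  have hga : (PySem.List.pyGet? graph (k : Int)).getD [] = graph.getD k [] := by
    rw [PySem.List.pyGet?_natCast, List.getD_eq_getElem?_getD]
  simp only [pvBfs, pvBfsLoop]
  rw [pvTemp_init, pvVis_init _ _ hk, hga]
  have h2 := pv_bfs_fold a k hk (graph.getD k []) [(k : Int)] 0 hrange (by simp)
  rw [add_zero, zero_add, pvSet_getI_self a k hk] at h2
  rw [h2, pvAbsSum_set a k hk]

-- build-phase invariant relating A's adjacency lists to B's neighbor sets
def pvInv (n : Nat) (g : List (List Int)) (nb : List (List Int)) : Prop :=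
  g.length = n ∧ nb.length = n ∧
  ∀ k : Nat, k < n →
    nb.getD k [] = PySem.List.dedup (g.getD k []) ∧
    ∀ x ∈ g.getD k [], 0 ≤ x ∧ x < (n : Int)

theorem pvDedup_append (l : List Int) (v : Int) :
    PySem.List.dedup (l ++ [v]) = PySem.Set.add (PySem.List.dedup l) v := by
  simp [PySem.List.dedup_eq_ofList, PySem.Set.ofList_eq_foldl, List.foldl_append]

theorem pvGetD_set_self (l : List (List Int)) (i : Nat) (x : List Int) (h : i < l.length) :
    (l.set i x).getD i [] = x := by
  simp [List.getD_eq_getElem?_getD, List.getElem?_set, h]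

theorem pvGetD_set_ne (l : List (List Int)) (i j : Nat) (x : List Int) (h : i ≠ j) :
    (l.set i x).getD j [] = l.getD j [] := by
  simp [List.getD_eq_getElem?_getD, List.getElem?_set, h]

-- one append to g[u] together with one add to nb[u] keeps the invariant
theorem pvInv_step (n : Nat) (g : List (List Int)) (nb : List (List Int))
    (hinv : pvInv n g nb) (u v : Int) (hu0 : 0 ≤ u) (hun : u < (n : Int))
    (hv0 : 0 ≤ v) (hvn : v < (n : Int)) :
    pvInv n (PySem.List.pySetD g u (((PySem.List.pyGet? g u).getD []) ++ [v]))
            (PySem.List.pySetD nb u (PySem.Set.add ((PySem.List.pyGet? nb u).getD PySem.Set.empty) v)) := by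
  obtain ⟨hg, hnb, hk⟩ := hinv
  have hut : u = ((u.toNat : Nat) : Int) := by omega
  have hult : u.toNat < n := by omega
  have hgu : (PySem.List.pyGet? g u).getD [] = g.getD u.toNat [] := by
    conv_lhs => rw [hut]
    rw [PySem.List.pyGet?_natCast, List.getD_eq_getElem?_getD]
  have hnbu : (PySem.List.pyGet? nb u).getD PySem.Set.empty = nb.getD u.toNat [] := by
    conv_lhs => rw [hut]
    rw [PySem.List.pyGet?_natCast, List.getD_eq_getElem?_getD]; rfl
  rw [PySem.List.pySetD_of_nonneg _ _ hu0, PySem.List.pySetD_of_nonneg _ _ hu0, hgu, hnbu]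
  refine ⟨by simp [hg], by simp [hnb], ?_⟩
  intro k hkn
  by_cases hku : k = u.toNat
  · subst hku
    rw [pvGetD_set_self _ _ _ (by omega), pvGetD_set_self _ _ _ (by omega)]
    constructor
    · rw [(hk _ hkn).1, pvDedup_append]
    · intro x hx
      rcases List.mem_append.mp hx with h | h
      · exact (hk _ hkn).2 x h
      · simp at h; subst h; exact ⟨hv0, hvn⟩
  · rw [pvGetD_set_ne _ _ _ _ (fun h => hku h.symm), pvGetD_set_ne _ _ _ _ (fun h => hku h.symm)]
    exact hk _ hkn

theorem pvInv_build : ∀ (edges : List (List Int)) (n : Nat) (g : List (List Int)) (nb : List (List Int)),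
    (∀ e ∈ edges, e.length = 2 ∧ ∀ x ∈ e, 0 ≤ x ∧ x < (n : Int)) →
    pvInv n g nb →
    pvInv n (pvBuildGraph edges g) (pvBuildNbrs edges nb) := by
  intro edges
  induction edges with
  | nil => intro n g nb _ hinv; exact hinv
  | cons e es ih =>
      intro n g nb he hinv
      obtain ⟨hlen, hrange⟩ := he e (by simp)
      match e, hlen with
      | [u, v], _ =>
        have hu := hrange u (by simp)
        have hv := hrange v (by simp)
        simp only [pvBuildGraph, pvBuildNbrs, List.foldl_cons]
        refine ih n _ _ (fun e' he' => he e' (by simp [he'])) ?_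
        exact pvInv_step n _ _ (pvInv_step n g nb hinv u v hu.1 hu.2 hv.1 hv.2) v u hv.1 hv.2 hu.1 hu.2

-- ===== VERDICT (by name: the statement is the Claim_ definition above) =====
theorem solution_spec : Claim_equal_solution := by
  intro a edges _ hpre
  unfold Spec_solution solution solution_alt
  by_cases hsum : a.sum ≠ 0
  · rw [if_pos hsum, if_pos hsum]
  · push_neg at hsum
    simp only [hsum, ne_eq, not_true_eq_false, if_false]
    have hedges := hpre hsum
    have hinv0 : pvInv a.length (List.replicate a.length []) (List.replicate a.length PySem.Set.empty) := by
      refine ⟨by simp, by simp, ?_⟩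
      intro k hk
      simp [List.getD_eq_getElem?_getD, List.getElem?_replicate, hk, PySem.List.dedup,
        PySem.Set.ofList, PySem.Set.empty]
    have hinv := pvInv_build edges a.length _ _ hedges hinv0
    obtain ⟨hg, hnb, hk⟩ := hinv
    apply PySem.List.foldl_congr_mem
    intro ans i hi
    have hin : i < a.length := List.mem_range.mp hi
    obtain ⟨hdedup, hrange⟩ := hk i hin
    rw [pvBfs_eq a _ i hin hg hrange]
    have hnbi : (PySem.List.pyGet? (pvBuildNbrs edges (List.replicate a.length PySem.Set.empty)) (i : Int)).getD []
        = pvDnew ((pvBuildGraph edges (List.replicate a.length [])).getD i []) [] := by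
      rw [PySem.List.pyGet?_natCast, ← List.getD_eq_getElem?_getD, hdedup, pvDedup_eq_dnew]
    rw [hnbi]
    have hfilt : pvDnew ((pvBuildGraph edges (List.replicate a.length [])).getD i []) [(i : Int)]
        = (pvDnew ((pvBuildGraph edges (List.replicate a.length [])).getD i []) []).filter
            (fun j => j != (i : Int)) := by
      have := pvDnew_filter ((pvBuildGraph edges (List.replicate a.length [])).getD i []) [(i : Int)] []
      simp only [List.append_nil] at this
      rw [this]
      apply List.filter_congr
      intro x _
      simp [bne, Bool.beq_eq_decide_eq]
    rw [hfilt]
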